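-- pv_equiv track=rewrite | github.com/yxuo/weather-report | src/report_generator/app/report_pdf.py | _group_reports
-- ===== SOURCE A (Python) =====
-- from typing import Dict, List
--
-- def _group_reports(entries: List[dict]) -> Dict[str, List[dict]]:
--     """
--     From entries, group by "Fenomeno"
--
--     :return:
--         {[fenomeno]: entries}
--     """
--     # group
--     groups: Dict[str, List[dict]] = {}
--     for entry in entries:
--         fenomeno: str = entry.get('fenomeno', 'Outros')
--         if fenomeno in groups:
--             groups[fenomeno].append(entry)
--         else:
--             groups[fenomeno] = [entry]
--
--     # sort
--     group_keys = groups.keys()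
--     if "Outros" in group_keys:
--         # 'Outros' is the last group
--         reports = groups['Outros'].copy()
--         del groups['Outros']
--         groups['Outros'] = reports
--
--     return groups
-- ===== SOURCE B (Python) =====
-- from typing import Dict, List
--
-- def _group_reports(entries: List[dict]) -> Dict[str, List[dict]]:
--     """Group entries by 'fenomeno' with 'Outros' last: stable-sort so that
--     'Outros' entries come after everything else, then group in one pass."""
--     ordered = sorted(entries, key=lambda e: e.get('fenomeno', 'Outros') == 'Outros')
--     groups: Dict[str, List[dict]] = {}
--     for entry in ordered:
--         groups.setdefault(entry.get('fenomeno', 'Outros'), []).append(entry)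
--     return groups
-- ===== Notes on version B (the rewrite author's own statement) =====
-- stated objective: simpler
-- what changed: B replaces A's group-then-delete-and-reinsert-'Outros' fix-up with a stable boolean-key sort that moves the 'Outros' entries to the end followed by a single setdefault grouping pass.
import Mathlib
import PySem

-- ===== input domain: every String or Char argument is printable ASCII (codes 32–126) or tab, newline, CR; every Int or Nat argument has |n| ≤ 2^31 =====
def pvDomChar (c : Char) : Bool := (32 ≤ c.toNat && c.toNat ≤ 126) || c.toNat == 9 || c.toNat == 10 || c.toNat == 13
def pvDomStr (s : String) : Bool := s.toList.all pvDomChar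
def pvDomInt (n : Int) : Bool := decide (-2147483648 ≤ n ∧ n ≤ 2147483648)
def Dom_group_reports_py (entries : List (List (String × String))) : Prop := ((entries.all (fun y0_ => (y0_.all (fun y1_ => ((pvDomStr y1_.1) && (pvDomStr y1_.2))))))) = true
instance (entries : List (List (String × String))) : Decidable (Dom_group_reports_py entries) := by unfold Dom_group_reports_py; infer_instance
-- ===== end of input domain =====

-- B groups the same entries in one pass after a stable boolean-key sort that puts the
-- 'Outros' entries last, replacing A's delete-and-reinsert fix-up (objective: simpler).

-- entry.get('fenomeno', 'Outros')  (shared helper: both Pythons perform this lookup)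
def pvFen (e : List (String × String)) : String :=
  (PySem.Dict.mk e).getD "fenomeno" "Outros"

-- ===== PORT A =====
def group_reports_py (entries : List (List (String × String))) : List (String × List (List (String × String))) :=
  let groups : PySem.Dict String (List (List (String × String))) :=
    entries.foldl (fun g e =>
      let fen := pvFen e
      if g.contains fen then g.modify fen [] (fun l => l ++ [e])  -- groups[fen].append(entry)
      else g.insert fen [e]) PySem.Dict.empty
  if groups.contains "Outros" then
    let reports := groups.getD "Outros" []
    (((groups.erase "Outros").insert "Outros" reports)).items
  else groups.items

-- ===== PORT B =====
def group_reports_py_alt (entries : List (List (String × String))) : List (String × List (List (String × String))) :=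
  let ordered := PySem.List.sorted entries (fun e => pvFen e == "Outros") false
  (ordered.foldl (fun g e => g.modify (pvFen e) [] (fun l => l ++ [e]))
    (PySem.Dict.empty : PySem.Dict String (List (List (String × String))))).items

-- ===== PRECONDITION & SPEC =====
def Spec_group_reports_py (entries : List (List (String × String))) (out : List (String × List (List (String × String)))) : Prop := out = group_reports_py_alt entries
instance (entries : List (List (String × String))) (out : List (String × List (List (String × String)))) : Decidable (Spec_group_reports_py entries out) := by unfold Spec_group_reports_py; infer_instance

-- ===== CLAIM (what is proved, stated in full; the proofs are below) =====
def Claim_equal_group_reports_py : Prop := ∀ (entries : List (List (String × String))), Dom_group_reports_py entries → Spec_group_reports_py entries (group_reports_py entries)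

-- ===== LEMMAS AND PROOFS =====

-- the common grouping step (setdefault-append)
def pvStep (g : PySem.Dict String (List (List (String × String)))) (e : List (String × String)) : PySem.Dict String (List (List (String × String))) :=
  g.modify (pvFen e) [] (fun l => l ++ [e])

-- A's loop body is pvStep
lemma pvBodyA_eq :
    (fun (g : PySem.Dict String (List (List (String × String)))) e =>
      let fen := pvFen e
      if g.contains fen then g.modify fen [] (fun l => l ++ [e])
      else g.insert fen [e]) = pvStep := by
  funext g e
  by_cases h : g.contains (pvFen e)
  · simp [h, pvStep]
  · simp [h, pvStep, PySem.Dict.modify,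
      PySem.Dict.getD_of_not_contains _ _ (by simpa using h)]

-- insertBy skips a prefix it does not go before and lands before a suffix it goes before
lemma pvInsertBy_mid {α : Type} (before : α → α → Bool) (x : α) :
    ∀ (A B : List α), (∀ a ∈ A, before x a = false) → (∀ b ∈ B, before x b = true) →
      PySem.List.insertBy before x (A ++ B) = A ++ x :: B := by
  intro A
  induction A with
  | nil =>
    intro B _ hB
    cases B with
    | nil => simp [PySem.List.insertBy]
    | cons b B' => simp [PySem.List.insertBy, hB b (by simp)]
  | cons a A' ih =>
    intro B hA hB
    have ha : before x a = false := hA a (by simp)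
    simp [PySem.List.insertBy, ha]
    exact ih B (fun a' h => hA a' (by simp [h])) hB

-- stable sort by a boolean key is a stable partition
lemma pvSorted_bool {α : Type} (k : α → Bool) :
    ∀ (xs A B : List α), (∀ a ∈ A, k a = false) → (∀ b ∈ B, k b = true) →
      xs.foldl (fun acc x => PySem.List.insertBy (fun a b => decide (k a < k b)) x acc) (A ++ B)
        = (A ++ xs.filter (fun x => !k x)) ++ (B ++ xs.filter k) := by
  intro xs
  induction xs with
  | nil => intro A B _ _; simp
  | cons x xs ih =>
    intro A B hA hB
    by_cases hk : k x = true
    · have hnotbefore : ∀ a ∈ A ++ B, (decide (k x < k a)) = false := by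
        intro a ha
        rcases List.mem_append.1 ha with h | h
        · simp [hA a h, hk, Bool.lt_iff]
        · simp [hB a h, hk]
      have hins : PySem.List.insertBy (fun a b => decide (k a < k b)) x (A ++ B) = (A ++ B) ++ [x] := by
        have := pvInsertBy_mid (fun a b => decide (k a < k b)) x (A ++ B) [] hnotbefore (by simp)
        simpa using this
      have hB' : ∀ b ∈ B ++ [x], k b = true := by
        intro b hb
        rcases List.mem_append.1 hb with h | h
        · exact hB b h
        · simp at h; simpa [h] using hk
      simp only [List.foldl_cons, hins]
      rw [List.append_assoc, ih A (B ++ [x]) hA hB']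
      simp [hk]
    · have hk' : k x = false := by simpa using hk
      have hins : PySem.List.insertBy (fun a b => decide (k a < k b)) x (A ++ B) = (A ++ [x]) ++ B := by
        rw [List.append_assoc]; simp only [List.singleton_append]
        apply pvInsertBy_mid
        · intro a ha; simp [hA a ha, hk']
        · intro b hb; simp [hB b hb, hk', Bool.lt_iff]
      have hA' : ∀ a ∈ A ++ [x], k a = false := by
        intro a ha
        rcases List.mem_append.1 ha with h | h
        · exact hA a h
        · simp at h; simpa [h] using hk'
      simp only [List.foldl_cons, hins]
      rw [ih (A ++ [x]) B hA' hB]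
      simp [hk']

lemma pvSorted_partition (entries : List (List (String × String))) :
    PySem.List.sorted entries (fun e => pvFen e == "Outros") false
      = entries.filter (fun e => !(pvFen e == "Outros")) ++ entries.filter (fun e => pvFen e == "Outros") := by
  have := pvSorted_bool (fun e => pvFen e == "Outros") entries [] [] (by simp) (by simp)
  simpa [PySem.List.sorted] using this

-- contains of the grouping fold
lemma pvContains_fold (c : String) :
    ∀ (l : List (List (String × String))) (d : PySem.Dict String (List (List (String × String)))),
      (l.foldl pvStep d).contains c = (d.contains c || l.any (fun e => pvFen e == c)) := by
  intro l
  induction l with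
  | nil => simp
  | cons e l ih =>
    intro d
    simp only [List.foldl_cons, List.any_cons]
    rw [ih]
    simp only [pvStep, PySem.Dict.modify, PySem.Dict.contains_insert]
    by_cases h : pvFen e = c
    · simp [h]
    · have h1 : (pvFen e == c) = false := by simp [h]
      have h2 : (c == pvFen e) = false := by simp [Ne.symm h]
      rw [h1, h2]
      simp

-- folding entries that all have key c over a dict whose items end with the c-pair
lemma pvFold_const_key (c : String) :
    ∀ (l : List (List (String × String))), (∀ e ∈ l, pvFen e = c) →
    ∀ (I : List (String × List (List (String × String)))) (v : List (List (String × String))),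
      (∀ p ∈ I, (p.1 == c) = false) →
      l.foldl pvStep (PySem.Dict.mk (I ++ [(c, v)])) = PySem.Dict.mk (I ++ [(c, v ++ l)]) := by
  intro l
  induction l with
  | nil => intro _ I v _; simp
  | cons e l ih =>
    intro hl I v hI
    have he : pvFen e = c := hl e (by simp)
    have hfind : (PySem.Dict.mk (I ++ [(c, v)])).get? c = some v := by
      simp only [PySem.Dict.get?]
      rw [List.find?_append]
      have : List.find? (fun p => p.1 == c) I = none := by
        rw [List.find?_eq_none]; intro p hp; simp [hI p hp]
      simp [this]
    have hcont : (PySem.Dict.mk (I ++ [(c, v)])).contains c = true := by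
      simp [PySem.Dict.contains_eq_isSome_get?, hfind]
    have hstep : pvStep (PySem.Dict.mk (I ++ [(c, v)])) e = PySem.Dict.mk (I ++ [(c, v ++ [e])]) := by
      simp only [pvStep, he, PySem.Dict.modify, PySem.Dict.getD, hfind, Option.getD_some]
      simp only [PySem.Dict.insert, hcont, if_true]
      congr 1
      rw [List.map_append]
      congr 1
      · have : ∀ p ∈ I, (fun p : String × List (List (String × String)) =>
            if (p.1 == c) = true then (c, v ++ [e]) else p) p = id p := by
          intro p hp; simp [hI p hp]
        rw [List.map_congr_left this, List.map_id]
      · simp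
    simp only [List.foldl_cons, hstep]
    rw [ih (fun e' he' => hl e' (by simp [he'])) I (v ++ [e]) hI]
    simp

-- erase commutes with the grouping fold, dropping the c-entries
lemma pvErase_fold (c : String) :
    ∀ (l : List (List (String × String))) (d : PySem.Dict String (List (List (String × String)))),
      (l.foldl pvStep d).erase c
        = (l.filter (fun e => !(pvFen e == c))).foldl pvStep (d.erase c) := by
  intro l
  induction l with
  | nil => intro d; simp
  | cons e l ih =>
    intro d
    by_cases he : pvFen e = c
    · have herase : (pvStep d e).erase c = d.erase c := by
        simp only [pvStep, PySem.Dict.modify, PySem.Dict.insert, PySem.Dict.erase, he]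
        by_cases hc : d.contains c = true
        · simp only [hc, if_true]
          congr 1
          rw [List.filter_map]
          have h1 : List.filter ((fun p : String × List (List (String × String)) => !(p.1 == c)) ∘
              (fun p => if (p.1 == c) = true then (c, d.getD c [] ++ [e]) else p)) d.items
              = List.filter (fun p => !(p.1 == c)) d.items := by
            apply List.filter_congr
            intro p _
            by_cases hp : p.1 = c <;> simp [hp]
          rw [h1]
          have h2 : ∀ p ∈ List.filter (fun p : String × List (List (String × String)) => !(p.1 == c)) d.items,
              (fun p : String × List (List (String × String)) =>
                if (p.1 == c) = true then (c, d.getD c [] ++ [e]) else p) p = id p := by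
            intro p hp
            have := (List.mem_filter.1 hp).2
            simp at this
            simp [this]
          rw [List.map_congr_left h2, List.map_id]
        · simp only [hc, Bool.false_eq_true, if_false]
          congr 1
          simp [List.filter_append]
      simp only [List.foldl_cons, List.filter_cons, he, beq_self_eq_true, Bool.not_true,
        Bool.false_eq_true, if_false]
      rw [ih (pvStep d e), herase]
    · have hcomm : (pvStep d e).erase c = pvStep (d.erase c) e := by
        have hget : (d.erase c).get? (pvFen e) = d.get? (pvFen e) := by
          simp only [PySem.Dict.get?, PySem.Dict.erase]
          rw [List.find?_filter]
          have hpred : (fun (p : String × List (List (String × String))) =>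
              decide ((!(p.1 == c)) = true ∧ (p.1 == pvFen e) = true))
              = (fun p => p.1 == pvFen e) := by
            funext p
            by_cases hp : p.1 = pvFen e <;> simp [hp, he]
          rw [hpred]
        have hcont : (d.erase c).contains (pvFen e) = d.contains (pvFen e) := by
          rw [PySem.Dict.contains_eq_isSome_get?, PySem.Dict.contains_eq_isSome_get?, hget]
        simp only [pvStep, PySem.Dict.modify, PySem.Dict.getD, hget]
        simp only [PySem.Dict.insert, hcont]
        by_cases hc : d.contains (pvFen e) = true
        · simp only [hc, if_true, PySem.Dict.erase]
          congr 1
          rw [List.filter_map]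
          have h1 : List.filter ((fun p : String × List (List (String × String)) => !(p.1 == c)) ∘
              (fun p => if (p.1 == pvFen e) = true then (pvFen e, (d.get? (pvFen e)).getD [] ++ [e]) else p)) d.items
              = List.filter (fun p => !(p.1 == c)) d.items := by
            apply List.filter_congr
            intro p _
            by_cases hp : p.1 = pvFen e <;> simp [hp]
          rw [h1]
        · simp only [hc, Bool.false_eq_true, if_false, PySem.Dict.erase]
          congr 1
          simp [List.filter_append, he]
      have hfilter : List.filter (fun e => !(pvFen e == c)) (e :: l)
          = e :: List.filter (fun e => !(pvFen e == c)) l := by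
        simp [he]
      rw [hfilter]
      simp only [List.foldl_cons]
      rw [ih (pvStep d e), hcomm]

-- getD of the grouping fold from empty is the filtered sublist
lemma pvGetD_fold (c : String) (l : List (List (String × String))) :
    (l.foldl pvStep (PySem.Dict.empty : PySem.Dict String (List (List (String × String))))).getD c []
      = l.filter (fun e => pvFen e == c) := by
  have hmap : l.foldl pvStep (PySem.Dict.empty : PySem.Dict String (List (List (String × String))))
      = (l.map (fun e => (pvFen e, e))).foldl (fun d p => d.modify p.1 [] (fun v => v ++ [p.2])) PySem.Dict.empty := by
    rw [List.foldl_map]; rfl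
  rw [hmap, PySem.Dict.getD_foldl_modify_append]
  rw [List.filter_map, List.map_map]
  simp [Function.comp_def]

-- ===== VERDICT (by name: the statement is the Claim_ definition above) =====
theorem group_reports_py_spec : Claim_equal_group_reports_py := by
  intro entries _
  unfold Spec_group_reports_py group_reports_py group_reports_py_alt
  rw [pvBodyA_eq, pvSorted_partition]
  dsimp only
  rw [List.foldl_append]
  rw [show (fun (g : PySem.Dict String (List (List (String × String)))) e =>
      g.modify (pvFen e) [] fun l => l ++ [e]) = pvStep from rfl]
  have hcontNe : ((entries.filter (fun e => !(pvFen e == "Outros"))).foldl pvStep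
      (PySem.Dict.empty : PySem.Dict String (List (List (String × String))))).contains "Outros" = false := by
    rw [pvContains_fold]
    simp only [PySem.Dict.contains_empty, Bool.false_or, List.any_eq_false]
    intro e he
    exact by simpa using (List.mem_filter.1 he).2
  by_cases hany : entries.any (fun e => pvFen e == "Outros") = true
  · -- there are 'Outros' entries
    have hcontG : ((entries.foldl pvStep
        (PySem.Dict.empty : PySem.Dict String (List (List (String × String))))).contains "Outros") = true := by
      rw [pvContains_fold]; simp [hany]
    obtain ⟨eo, heo, hko⟩ := List.any_eq_true.1 hany
    have hne : entries.filter (fun e => pvFen e == "Outros") ≠ [] := by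
      intro h
      have : eo ∈ entries.filter (fun e => pvFen e == "Outros") := List.mem_filter.2 ⟨heo, hko⟩
      simp [h] at this
    obtain ⟨e0, rest, hoe⟩ := List.exists_cons_of_ne_nil hne
    have he0 : pvFen e0 = "Outros" := by
      have : e0 ∈ entries.filter (fun e => pvFen e == "Outros") := by rw [hoe]; simp
      simpa using (List.mem_filter.1 this).2
    have hrest : ∀ e ∈ rest, pvFen e = "Outros" := by
      intro e he
      have : e ∈ entries.filter (fun e => pvFen e == "Outros") := by rw [hoe]; simp [he]
      simpa using (List.mem_filter.1 this).2
    have hI : ∀ p ∈ ((entries.filter (fun e => !(pvFen e == "Outros"))).foldl pvStep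
        (PySem.Dict.empty : PySem.Dict String (List (List (String × String))))).items, (p.1 == "Outros") = false := by
      have := hcontNe
      simp only [PySem.Dict.contains, List.any_eq_false] at this
      intro p hp
      simpa using this p hp
    set d0 := (entries.filter (fun e => !(pvFen e == "Outros"))).foldl pvStep
      (PySem.Dict.empty : PySem.Dict String (List (List (String × String)))) with hd0
    -- B side
    have hstep : pvStep d0 e0 = PySem.Dict.mk (d0.items ++ [("Outros", [e0])]) := by
      rw [pvStep, he0, PySem.Dict.modify,
        PySem.Dict.getD_of_not_contains _ _ hcontNe]
      simp only [PySem.Dict.insert, hcontNe, Bool.false_eq_true, if_false, List.nil_append]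
    have hB : (entries.filter (fun e => pvFen e == "Outros")).foldl pvStep d0
        = PySem.Dict.mk (d0.items ++ [("Outros", e0 :: rest)]) := by
      rw [hoe, List.foldl_cons, hstep]
      exact pvFold_const_key "Outros" rest hrest d0.items [e0] hI
    -- A side
    have hGg : (entries.foldl pvStep
        (PySem.Dict.empty : PySem.Dict String (List (List (String × String))))).getD "Outros" []
        = e0 :: rest := by rw [pvGetD_fold, hoe]
    have hGe : (entries.foldl pvStep
        (PySem.Dict.empty : PySem.Dict String (List (List (String × String))))).erase "Outros" = d0 := by
      rw [pvErase_fold]; rfl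
    simp only [hcontG, if_true, hGg, hGe, hB]
    simp only [PySem.Dict.insert, hcontNe, Bool.false_eq_true, if_false]
  · -- no 'Outros' entries
    have hany' : entries.any (fun e => pvFen e == "Outros") = false := by
      simpa using hany
    have hcontG : ((entries.foldl pvStep
        (PySem.Dict.empty : PySem.Dict String (List (List (String × String))))).contains "Outros") = false := by
      rw [pvContains_fold]; simp [hany']
    have hoe : entries.filter (fun e => pvFen e == "Outros") = [] := by
      rw [List.filter_eq_nil_iff]
      intro e he
      have := (List.any_eq_false.1 hany') e he
      simpa using this
    have hfe : entries.filter (fun e => !(pvFen e == "Outros")) = entries := by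
      rw [List.filter_eq_self]
      intro e he
      have := (List.any_eq_false.1 hany') e he
      simpa using this
    simp only [hcontG, Bool.false_eq_true, if_false, hoe, hfe, List.foldl_nil]
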